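-- pv_equiv track=rewrite | github.com/TrainingByPackt/PythonFundamentals | Lesson06/space_explorer_solution.py | calculate_path_to_goal
-- ===== SOURCE A (Python) =====
-- def calculate_path_to_goal(sorted_object_list):
--     output_list = list()
--     for i in sorted_object_list:
--         if i[2][0] in 'FT':
--             output_list.append(i)
--         elif i[2][0] in 'G':
--             output_list.append(i)
--             break
--
--     return output_list
-- ===== SOURCE B (Python) =====
-- def calculate_path_to_goal(sorted_object_list):
--     # locate the boundary: first item whose marker char stops the scan
--     p = next((j for j, i in enumerate(sorted_object_list)
--               if i[2][0] not in 'FT' and i[2][0] in 'G'),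
--              len(sorted_object_list))
--     out = [i for i in sorted_object_list[:p] if i[2][0] in 'FT']
--     if p < len(sorted_object_list):
--         out.append(sorted_object_list[p])
--     return out
-- ===== Notes on version B (the rewrite author's own statement) =====
-- stated objective: alternative
-- what changed: Replaces A's single early-exit accumulating loop with a locate-the-boundary scan (first 'G' marker item, same stop test) followed by a filtering comprehension over the prefix plus the appended boundary item; Pre_ excludes exactly the inputs where A raises IndexError on an empty marker string reached by the scan.
import Mathlib
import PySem

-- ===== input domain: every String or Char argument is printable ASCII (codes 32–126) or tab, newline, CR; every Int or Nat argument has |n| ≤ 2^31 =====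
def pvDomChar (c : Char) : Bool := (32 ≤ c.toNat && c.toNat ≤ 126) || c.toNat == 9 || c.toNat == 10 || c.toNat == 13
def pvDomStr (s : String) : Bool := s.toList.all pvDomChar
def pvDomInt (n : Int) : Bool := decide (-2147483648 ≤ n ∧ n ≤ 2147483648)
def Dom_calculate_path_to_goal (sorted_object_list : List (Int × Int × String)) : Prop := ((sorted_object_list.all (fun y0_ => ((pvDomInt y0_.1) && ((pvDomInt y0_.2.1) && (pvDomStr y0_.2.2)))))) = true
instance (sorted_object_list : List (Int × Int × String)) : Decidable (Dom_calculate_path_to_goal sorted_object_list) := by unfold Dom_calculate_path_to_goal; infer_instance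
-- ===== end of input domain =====

-- B locates the first stopping item (marker 'G') and then filters the prefix,
-- instead of A's single early-exit accumulating loop (objective: alternative decomposition).

-- ===== PORT A =====
-- c in 'FT' for the one-character string i[2][0]
def pvKeep (c : Char) : Bool := c = 'F' || c = 'T'

-- the for-loop of A, with its output_list accumulator; pyGet? none = IndexError (excluded by Pre_)
def pvLoopA (acc : List (Int × Int × String)) : List (Int × Int × String) → List (Int × Int × String)
  | [] => acc
  | i :: rest =>
    match PySem.Str.pyGet? i.2.2 0 with
    | none => acc
    | some c =>
      if pvKeep c then pvLoopA (acc ++ [i]) rest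
      else if c = 'G' then acc ++ [i]
      else pvLoopA acc rest

def calculate_path_to_goal (sorted_object_list : List (Int × Int × String)) : List (Int × Int × String) :=
  pvLoopA [] sorted_object_list

-- ===== PORT B =====
-- i[2][0] not in 'FT' and i[2][0] in 'G'
def pvStop (i : Int × Int × String) : Bool :=
  match PySem.Str.pyGet? i.2.2 0 with
  | none => false
  | some c => !(pvKeep c) && (c = 'G')

-- i[2][0] in 'FT'
def pvKeepItem (i : Int × Int × String) : Bool :=
  match PySem.Str.pyGet? i.2.2 0 with
  | none => false
  | some c => pvKeep c

def calculate_path_to_goal_alt (sorted_object_list : List (Int × Int × String)) : List (Int × Int × String) :=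
  let p := (List.findIdx? pvStop sorted_object_list).getD sorted_object_list.length
  ((sorted_object_list.take p).filter pvKeepItem) ++ (sorted_object_list.drop p).take 1

-- ===== PRECONDITION & SPEC =====
-- Pre_ excludes exactly the inputs on which A raises IndexError: an item with an
-- empty marker string reached before (or at) the first stopping 'G' item.
def pvScanOk : List (Int × Int × String) → Bool
  | [] => true
  | i :: rest =>
    match i.2.2.toList with
    | [] => false
    | c :: _ => (!(pvKeep c) && (c = 'G')) || pvScanOk rest

def Pre_calculate_path_to_goal (sorted_object_list : List (Int × Int × String)) : Prop :=
  pvScanOk sorted_object_list = true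
instance (sorted_object_list : List (Int × Int × String)) : Decidable (Pre_calculate_path_to_goal sorted_object_list) := by unfold Pre_calculate_path_to_goal; infer_instance

def pvWitness_calculate_path_to_goal : (List (Int × Int × String)) :=
  [(1, 2, "Fuel"), (3, 4, "X"), (5, 6, "Tank"), (7, 8, "Goal"), (9, 9, "Trap")]

def Spec_calculate_path_to_goal (sorted_object_list : List (Int × Int × String)) (out : List (Int × Int × String)) : Prop := out = calculate_path_to_goal_alt sorted_object_list
instance (sorted_object_list : List (Int × Int × String)) (out : List (Int × Int × String)) : Decidable (Spec_calculate_path_to_goal sorted_object_list out) := by unfold Spec_calculate_path_to_goal; infer_instance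

-- ===== CLAIM (what is proved, stated in full; the proofs are below) =====
def Claim_equal_calculate_path_to_goal : Prop := ∀ (sorted_object_list : List (Int × Int × String)), Dom_calculate_path_to_goal sorted_object_list → Pre_calculate_path_to_goal sorted_object_list → Spec_calculate_path_to_goal sorted_object_list (calculate_path_to_goal sorted_object_list)

-- ===== LEMMAS AND PROOFS =====

theorem pvLoopA_acc (l : List (Int × Int × String)) :
    ∀ acc, pvLoopA acc l = acc ++ pvLoopA [] l := by
  induction l with
  | nil => intro acc; simp [pvLoopA]
  | cons i rest ih =>
    intro acc
    simp only [pvLoopA]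
    cases h : PySem.Str.pyGet? i.2.2 0 with
    | none => simp
    | some c =>
      by_cases hk : pvKeep c = true
      · simp [hk, ih (acc ++ [i]), ih [i]]
      · by_cases hg : c = 'G'
        · subst hg; simp [show pvKeep 'G' = false by decide]
        · simp [hk, hg, ih acc]

theorem pvGet_head (s : String) (c : Char) (cs : List Char) (h : s.toList = c :: cs) :
    PySem.Str.pyGet? s 0 = some c := by
  simp [PySem.Str.pyGet?, PySem.List.pyGet?, PySem.List.pyIdx?, h]

theorem pvAlt_cons_stop (i : Int × Int × String) (rest : List (Int × Int × String))
    (h : pvStop i = true) : calculate_path_to_goal_alt (i :: rest) = [i] := by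
  simp [calculate_path_to_goal_alt, List.findIdx?_cons, h]

theorem pvAlt_cons_go (i : Int × Int × String) (rest : List (Int × Int × String))
    (h : pvStop i = false) :
    calculate_path_to_goal_alt (i :: rest)
      = (if pvKeepItem i then [i] else []) ++ calculate_path_to_goal_alt rest := by
  simp only [calculate_path_to_goal_alt, List.findIdx?_cons, h]
  cases hf : List.findIdx? pvStop rest with
  | none =>
    simp only [Option.map_none, Option.getD_none, List.length_cons]
    by_cases hk : pvKeepItem i = true <;>
      simp [hk, List.take_succ_cons, List.drop_succ_cons]
  | some q =>
    simp only [Option.map_some, Option.getD_some]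
    by_cases hk : pvKeepItem i = true <;>
      simp [hk, List.take_succ_cons, List.drop_succ_cons]

theorem pvMain (l : List (Int × Int × String)) (hp : pvScanOk l = true) :
    calculate_path_to_goal l = calculate_path_to_goal_alt l := by
  induction l with
  | nil => simp [calculate_path_to_goal, pvLoopA, calculate_path_to_goal_alt]
  | cons i rest ih =>
    cases hs : i.2.2.toList with
    | nil => simp [pvScanOk, hs] at hp
    | cons c cs =>
      have hget := pvGet_head i.2.2 c cs hs
      have hp' : (!(pvKeep c) && (c = 'G')) || pvScanOk rest = true := by
        simpa [pvScanOk, hs] using hp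
      by_cases hk : pvKeep c = true
      · -- kept item: both continue, i prepended
        have hrest : pvScanOk rest = true := by simpa [hk] using hp'
        have hstop : pvStop i = false := by
          simp only [pvStop, hget]; simp [hk]
        have hkeep : pvKeepItem i = true := by
          simp only [pvKeepItem, hget]; exact hk
        have : calculate_path_to_goal (i :: rest)
            = i :: calculate_path_to_goal rest := by
          simp only [calculate_path_to_goal, pvLoopA, hget, hk, if_true]
          simpa using pvLoopA_acc rest [i]
        rw [this, pvAlt_cons_go i rest hstop, hkeep, ih hrest]
        simp
      · by_cases hg : c = 'G'
        · -- stopping item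
          subst hg
          have hstop : pvStop i = true := by
            simp only [pvStop, hget]; decide
          have : calculate_path_to_goal (i :: rest) = [i] := by
            simp only [calculate_path_to_goal, pvLoopA, hget]
            simp [show pvKeep 'G' = false by decide]
          rw [this, pvAlt_cons_stop i rest hstop]
        · -- skipped item
          have hrest : pvScanOk rest = true := by simpa [hk, hg] using hp'
          have hstop : pvStop i = false := by
            simp only [pvStop, hget]; simp [hg]
          have hkeep : pvKeepItem i = false := by
            simp only [pvKeepItem, hget]; simpa using hk
          have : calculate_path_to_goal (i :: rest) = calculate_path_to_goal rest := by
            simp only [calculate_path_to_goal, pvLoopA, hget]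
            simp [hk, hg]
          rw [this, pvAlt_cons_go i rest hstop, hkeep, ih hrest]
          simp

-- ===== VERDICT (by name: the statement is the Claim_ definition above) =====
theorem calculate_path_to_goal_spec : Claim_equal_calculate_path_to_goal := by
  intro l _ hp
  unfold Spec_calculate_path_to_goal
  exact pvMain l hp
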